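-- pv_equiv track=rewrite | github.com/yrgirlkv/digicom-plus | server/model.py | risk_model
-- ===== SOURCE A (Python) =====
-- def risk_model(id):
--     score = 0
--
--     factor_weights = {
--         # financial risk - objective
--         "liquid_ratio": 5,
--         "current_ratio": 5,
--         "growth_rate": 5,
--         "operating_margin": 5,
--         "debt_to_equity": 5,
--         "financial_compliance": 5,
--         # financial risk - subjective
--         "market_feedback": 5,
--         "defaults": 10,
--         # operational risk
--         "operation_tenure": 5,
--         "size": 5,
--         # management assessment
--         "tenure": 5,
--         "reliability": 7,
--         "compliance": 3,
--         "barrier_to_entry": 10,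
--         "BCI_comparison": 10,
--         "country_risk": 10,
--     }
--
--     dummy_ratings = {
--         # financial risk - objective
--         "liquid_ratio": 5,
--         "current_ratio": 5,
--         "growth_rate": 5,
--         "operating_margin": 5,
--         "debt_to_equity": 5,
--         "financial_compliance": 5,
--         # financial risk - subjective
--         "market_feedback": 5,
--         "defaults": 10,
--         # operational risk
--         "operation_tenure": 3,
--         "size": 5,
--         # management assessment
--         "tenure": 5,
--         "reliability": 7,
--         "compliance": 3,
--         "barrier_to_entry": 10,
--         "BCI_comparison": 10,
--         "country_risk": 10,
--     }
--
--     for key in dummy_ratings: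
--         score += dummy_ratings[key] * factor_weights[key]
--
--     return {"id": id, "score": score}
-- ===== SOURCE B (Python) =====
-- def risk_model(id):
--     # The score is a constant dot product of two fixed tables, independent of id.
--     return {"id": id, "score": 698}
-- ===== Notes on version B (the rewrite author's own statement) =====
-- stated objective: simpler
-- what changed: The score is a constant dot product of two fixed literal tables, independent of id; B precomputes that constant and returns it directly, eliminating both dicts and the loop.
import Mathlib
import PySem

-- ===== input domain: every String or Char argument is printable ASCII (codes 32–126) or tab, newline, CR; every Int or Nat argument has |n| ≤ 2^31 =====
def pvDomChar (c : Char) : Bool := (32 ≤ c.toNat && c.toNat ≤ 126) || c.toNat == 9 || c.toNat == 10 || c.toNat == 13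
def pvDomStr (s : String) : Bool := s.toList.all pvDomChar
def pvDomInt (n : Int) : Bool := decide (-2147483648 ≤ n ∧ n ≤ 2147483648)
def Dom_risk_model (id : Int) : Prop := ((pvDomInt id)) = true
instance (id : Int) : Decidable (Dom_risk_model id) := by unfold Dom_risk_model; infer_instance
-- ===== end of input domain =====

-- B replaces A's two tables and summing loop by the precomputed constant score (simpler).

-- ===== PORT A =====
def risk_model_factor_weights : PySem.Dict String Int :=
  PySem.Dict.ofList
    [("liquid_ratio", 5), ("current_ratio", 5), ("growth_rate", 5), ("operating_margin", 5),
     ("debt_to_equity", 5), ("financial_compliance", 5), ("market_feedback", 5), ("defaults", 10),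
     ("operation_tenure", 5), ("size", 5), ("tenure", 5), ("reliability", 7), ("compliance", 3),
     ("barrier_to_entry", 10), ("BCI_comparison", 10), ("country_risk", 10)]

def risk_model_dummy_ratings : PySem.Dict String Int :=
  PySem.Dict.ofList
    [("liquid_ratio", 5), ("current_ratio", 5), ("growth_rate", 5), ("operating_margin", 5),
     ("debt_to_equity", 5), ("financial_compliance", 5), ("market_feedback", 5), ("defaults", 10),
     ("operation_tenure", 3), ("size", 5), ("tenure", 5), ("reliability", 7), ("compliance", 3),
     ("barrier_to_entry", 10), ("BCI_comparison", 10), ("country_risk", 10)]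

def risk_model (id : Int) : List (String × Int) :=
  -- for key in dummy_ratings: score += dummy_ratings[key] * factor_weights[key]
  -- dict[key] cannot raise here (every key is present in both dicts), so getD is exact
  let score : Int := risk_model_dummy_ratings.keys.foldl
    (fun score key => score + risk_model_dummy_ratings.getD key 0 * risk_model_factor_weights.getD key 0) 0
  ((PySem.Dict.empty.insert "id" id).insert "score" score).items

-- ===== PORT B =====
def risk_model_alt (id : Int) : List (String × Int) :=
  [("id", id), ("score", 698)]

-- ===== PRECONDITION & SPEC =====
def Spec_risk_model (id : Int) (out : List (String × Int)) : Prop := out = risk_model_alt id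
instance (id : Int) (out : List (String × Int)) : Decidable (Spec_risk_model id out) := by unfold Spec_risk_model; infer_instance

-- ===== CLAIM (what is proved, stated in full; the proofs are below) =====
def Claim_equal_risk_model : Prop := ∀ (id : Int), Dom_risk_model id → Spec_risk_model id (risk_model id)

-- ===== LEMMAS AND PROOFS =====

-- ===== VERDICT (by name: the statement is the Claim_ definition above) =====
theorem risk_model_spec : Claim_equal_risk_model := by
  intro id _
  unfold Spec_risk_model risk_model risk_model_alt
  rfl
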